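-- pv_equiv track=rewrite | github.com/StanleyGemstone/alx-frontend-for-fun | markdown2html.py | parse_paragraphs
-- ===== SOURCE A (Python) =====
-- from typing import List
--
-- def parse_paragraphs(markdown_content: List[str]) -> List[str]:
--     """Parse Markdown paragraphs and generate HTML."""
--     html_content = []
--     in_paragraph = False
--     for line in markdown_content:
--         if line.strip():  # Check if the line is not empty
--             if not in_paragraph:
--                 html_content.append('<p>\n')
--                 in_paragraph = True
--             html_content.append(f'    {line.strip()}\n')
--         else:
--             if in_paragraph:
--                 html_content.append('</p>\n')
--                 in_paragraph = False
--             html_content.append('\n')  # Add an empty line for readability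
--
--     # Close the paragraph if it's still open
--     if in_paragraph:
--         html_content.append('</p>\n')
--
--     return html_content
-- ===== SOURCE B (Python) =====
-- from typing import List
--
-- def parse_paragraphs(markdown_content: List[str]) -> List[str]:
--     """Parse Markdown paragraphs and generate HTML (run-based decomposition)."""
--     html_content = []
--     rest = markdown_content
--     while rest:
--         key = bool(rest[0].strip())
--         i = 0
--         while i < len(rest) and bool(rest[i].strip()) == key:
--             i += 1
--         run, rest = rest[:i], rest[i:]
--         if key:
--             html_content.append('<p>\n')
--             html_content.extend('    ' + l.strip() + '\n' for l in run)
--             html_content.append('</p>\n')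
--         else:
--             html_content.extend('\n' for _ in run)
--     return html_content
-- ===== Notes on version B (the rewrite author's own statement) =====
-- stated objective: alternative
-- what changed: Replaces the line-by-line in_paragraph state machine with a recursive run-based decomposition: split off the maximal leading run of all-nonblank or all-blank lines, render that whole block at once, and recurse on the rest.
import Mathlib
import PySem

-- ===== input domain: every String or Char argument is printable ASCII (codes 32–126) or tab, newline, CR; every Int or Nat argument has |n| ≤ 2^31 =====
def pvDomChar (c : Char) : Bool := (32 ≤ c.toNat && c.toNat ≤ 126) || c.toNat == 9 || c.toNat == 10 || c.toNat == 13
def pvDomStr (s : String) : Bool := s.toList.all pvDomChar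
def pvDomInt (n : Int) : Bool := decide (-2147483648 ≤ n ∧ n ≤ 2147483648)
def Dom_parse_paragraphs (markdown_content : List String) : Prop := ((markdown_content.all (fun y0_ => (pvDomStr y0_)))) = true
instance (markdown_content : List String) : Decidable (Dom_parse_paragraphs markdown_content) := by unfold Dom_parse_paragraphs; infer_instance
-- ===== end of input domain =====

-- B replaces A's line-by-line in_paragraph state machine with a recursive run-based
-- decomposition (peel a maximal run of nonblank/blank lines, render the block, recurse);
-- objective: alternative decomposition, same cost.

-- ===== PORT A =====
-- A's loop body on state (html, in_paragraph); branches in A's order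
def ppA_step (st : List String × Bool) (line : String) : List String × Bool :=
  if PySem.Str.strip line != "" then
    let html := if !st.2 then st.1 ++ ["<p>\n"] else st.1
    (html ++ ["    " ++ PySem.Str.strip line ++ "\n"], true)
  else
    let html := if st.2 then st.1 ++ ["</p>\n"] else st.1
    (html ++ ["\n"], false)

-- literal transliteration of A: foldl over lines with state (html, in_paragraph), then close
def parse_paragraphs (markdown_content : List String) : List String :=
  let st := markdown_content.foldl ppA_step ([], false)
  if st.2 then st.1 ++ ["</p>\n"] else st.1

-- ===== PORT B =====
-- Source B's run predicate: does line x have the same (non)blank key as the run being peeled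
def pp_pred (key : Bool) (x : String) : Bool := (PySem.Str.strip x != "") == key

-- Source B's outer while over the remaining list, as the obvious structural recursion;
-- the inner prefix-run while loop / slices are takeWhile / dropWhile
def parse_paragraphs_alt : List String → List String
  | [] => []
  | l :: ls =>
    let key := PySem.Str.strip l != ""
    let run := List.takeWhile (pp_pred key) (l :: ls)
    let block := if key then
        "<p>\n" :: run.map (fun x => "    " ++ PySem.Str.strip x ++ "\n") ++ ["</p>\n"]
      else run.map (fun _ => "\n")
    block ++ parse_paragraphs_alt (List.dropWhile (pp_pred key) (l :: ls))
termination_by md => md.length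
decreasing_by
  simp only [List.dropWhile_cons, pp_pred, beq_self_eq_true, if_true, List.length_cons]
  exact Nat.lt_succ_of_le (List.length_dropWhile_le _ _)

-- ===== PRECONDITION & SPEC =====
def Spec_parse_paragraphs (markdown_content : List String) (out : List String) : Prop := out = parse_paragraphs_alt markdown_content
instance (markdown_content : List String) (out : List String) : Decidable (Spec_parse_paragraphs markdown_content out) := by unfold Spec_parse_paragraphs; infer_instance

-- ===== CLAIM (what is proved, stated in full; the proofs are below) =====
def Claim_equal_parse_paragraphs : Prop := ∀ (markdown_content : List String), Dom_parse_paragraphs markdown_content → Spec_parse_paragraphs markdown_content (parse_paragraphs markdown_content)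

-- ===== LEMMAS AND PROOFS =====

-- tail semantics of A's loop: output still to be produced from state in_paragraph = inp
def ppA : List String → Bool → List String
  | [], inp => if inp then ["</p>\n"] else []
  | l :: ls, inp =>
    if PySem.Str.strip l != "" then
      (if inp then [] else ["<p>\n"]) ++ ("    " ++ PySem.Str.strip l ++ "\n") :: ppA ls true
    else
      (if inp then ["</p>\n"] else []) ++ "\n" :: ppA ls false

theorem ppA_foldl (ls : List String) : ∀ (acc : List String) (inp : Bool),
    (let st := ls.foldl ppA_step (acc, inp)
     if st.2 then st.1 ++ ["</p>\n"] else st.1) = acc ++ ppA ls inp := by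
  induction ls with
  | nil => intro acc inp; cases inp <;> simp [ppA]
  | cons l ls ih =>
    intro acc inp
    simp only [List.foldl_cons]
    by_cases h : (PySem.Str.strip l != "") = true <;> cases inp <;>
      simp [ppA_step, ppA, h, ih, List.append_assoc]

theorem alt_blank_run (ls : List String) :
    parse_paragraphs_alt ls =
      List.replicate (ls.takeWhile (pp_pred false)).length "\n" ++
        parse_paragraphs_alt (ls.dropWhile (pp_pred false)) := by
  cases ls with
  | nil => simp
  | cons l ls =>
    by_cases h : (PySem.Str.strip l != "") = true
    · have hp : pp_pred false l = false := by simp [pp_pred, h]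
      simp [hp]
    · have hb : (PySem.Str.strip l != "") = false := by simpa using h
      rw [parse_paragraphs_alt]
      simp [hb, pp_pred, List.replicate_succ]

theorem ppA_eq_alt (ls : List String) :
    ppA ls false = parse_paragraphs_alt ls ∧
    ppA ls true =
      (ls.takeWhile (pp_pred true)).map (fun x => "    " ++ PySem.Str.strip x ++ "\n") ++
        ["</p>\n"] ++ parse_paragraphs_alt (ls.dropWhile (pp_pred true)) := by
  induction ls with
  | nil => simp [ppA, parse_paragraphs_alt]
  | cons l ls ih =>
    by_cases h : (PySem.Str.strip l != "") = true
    · have hp : pp_pred true l = true := by simp [pp_pred, h]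
      constructor
      · rw [parse_paragraphs_alt]
        simp [ppA, h, hp, ih.2]
      · simp [ppA, h, hp, ih.2]
    · have hb : (PySem.Str.strip l != "") = false := by simpa using h
      have hp : pp_pred true l = false := by simp [pp_pred, hb]
      have hq : pp_pred false l = true := by simp [pp_pred, hb]
      have a1 : parse_paragraphs_alt (l :: ls) = "\n" :: parse_paragraphs_alt ls := by
        rw [alt_blank_run (l :: ls), alt_blank_run ls]
        simp [hq, List.replicate_succ]
      constructor
      · rw [a1]
        simp [ppA, hb, ih.1]
      · simp [ppA, hb, hp, ih.1, a1]

-- ===== VERDICT (by name: the statement is the Claim_ definition above) =====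
theorem parse_paragraphs_spec : Claim_equal_parse_paragraphs := by
  intro md _
  unfold Spec_parse_paragraphs parse_paragraphs
  rw [ppA_foldl md [] false]
  simpa using (ppA_eq_alt md).1
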